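-- pv_equiv track=rewrite | github.com/jhidalgo-utep/problem-solving-solutions | data-structures/Leetcode/Practice/runner_15.py | is_anagram
-- ===== SOURCE A (Python) =====
-- def is_anagram(s, t):
--     if len(s) != len(t):
--         return False
--
--     d = dict()
--     for c in s:
--         if c in d:
--             d[c] += 1
--         else:
--             d[c] = 1
--
--     for c in t:
--         if c in d:
--             d[c] -= 1
--         else:
--             return False
--
--     for v in d.values():
--         if v != 0:
--             return False
--     return True
-- ===== SOURCE B (Python) =====
-- def is_anagram(s, t):
--     return sorted(s) == sorted(t)
-- ===== Notes on version B (the rewrite author's own statement) =====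
-- stated objective: idiomatic
-- what changed: Replaced the three-pass hand-maintained count dictionary (build counts over s, decrement over t with early exit, scan values for nonzero) by a single sort-and-compare: sorted(s) == sorted(t).
import Mathlib
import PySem

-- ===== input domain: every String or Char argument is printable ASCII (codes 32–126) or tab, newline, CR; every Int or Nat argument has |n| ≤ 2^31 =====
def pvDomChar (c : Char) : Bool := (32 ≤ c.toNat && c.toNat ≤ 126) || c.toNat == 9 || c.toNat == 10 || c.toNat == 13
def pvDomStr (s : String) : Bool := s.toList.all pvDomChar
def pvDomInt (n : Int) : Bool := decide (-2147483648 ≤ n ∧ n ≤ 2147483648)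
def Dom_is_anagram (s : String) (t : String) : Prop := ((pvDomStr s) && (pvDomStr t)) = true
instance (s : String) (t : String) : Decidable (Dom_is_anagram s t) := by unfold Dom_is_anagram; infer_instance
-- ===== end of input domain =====

-- B replaces A's three passes over a count dictionary by a single sort-and-compare (idiomatic; not faster).

-- ===== PORT A =====
-- second loop of A: for c in t: if c in d: d[c] -= 1 else: return False  (none = early False)
def isAnagramSub (d : PySem.Dict Char Int) : List Char → Option (PySem.Dict Char Int)
  | [] => some d
  | c :: cs => if d.contains c then isAnagramSub (d.insert c (d.getD c 0 - 1)) cs else none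

def is_anagram (s : String) (t : String) : Bool :=
  if PySem.Str.len s ≠ PySem.Str.len t then false
  else
    let d := s.toList.foldl
      (fun d c => if d.contains c then d.insert c (d.getD c 0 + 1) else d.insert c 1)
      PySem.Dict.empty
    match isAnagramSub d t.toList with
    | none => false
    | some d' => d'.values.all (fun v => v == 0)

-- ===== PORT B =====
def is_anagram_alt (s : String) (t : String) : Bool :=
  decide (PySem.List.sorted s.toList (fun x => x) false = PySem.List.sorted t.toList (fun x => x) false)

-- ===== PRECONDITION & SPEC =====
def Spec_is_anagram (s : String) (t : String) (out : Bool) : Prop := out = is_anagram_alt s t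
instance (s : String) (t : String) (out : Bool) : Decidable (Spec_is_anagram s t out) := by unfold Spec_is_anagram; infer_instance

-- ===== CLAIM (what is proved, stated in full; the proofs are below) =====
def Claim_equal_is_anagram : Prop := ∀ (s : String) (t : String), Dom_is_anagram s t → Spec_is_anagram s t (is_anagram s t)

-- ===== LEMMAS AND PROOFS =====

theorem alt_eq_perm (s t : String) :
    is_anagram_alt s t = decide (s.toList.Perm t.toList) := by
  simp [is_anagram_alt, PySem.List.sorted_id_eq_sorted_id_iff_perm]

theorem build_eq_counter (l : List Char) :
    l.foldl (fun d c => if d.contains c then d.insert c (d.getD c 0 + 1) else d.insert c 1)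
      PySem.Dict.empty = PySem.Dict.counter l := by
  rw [← PySem.Dict.foldl_insert_getD_add_one_eq_counter]
  congr 1
  funext d c
  by_cases h : d.contains c = true
  · simp [h]
  · simp only [Bool.not_eq_true] at h
    rw [if_neg (by simp [h]), PySem.Dict.getD_of_not_contains _ _ h]
    norm_num

theorem getD_foldl_insert_sub_one (l : List Char) (d : PySem.Dict Char Int) (v : Char) :
    (l.foldl (fun d c => d.insert c (d.getD c 0 - 1)) d).getD v 0
      = d.getD v 0 - l.count v := by
  induction l generalizing d with
  | nil => simp
  | cons c cs ih =>
    simp only [List.foldl_cons, ih, List.count_cons]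
    rw [PySem.Dict.getD_insert]
    by_cases hvc : v = c
    · subst hvc
      simp only [BEq.rfl, if_true]
      push_cast
      ring
    · rw [if_neg hvc]
      simp only [beq_iff_eq]
      rw [if_neg (fun h => hvc h.symm)]
      push_cast
      ring

theorem subLoop_some (l : List Char) (d : PySem.Dict Char Int)
    (h : ∀ c ∈ l, d.contains c = true) :
    isAnagramSub d l = some (l.foldl (fun d c => d.insert c (d.getD c 0 - 1)) d) := by
  induction l generalizing d with
  | nil => simp [isAnagramSub]
  | cons c cs ih =>
    have hc : d.contains c = true := h c (List.mem_cons_self ..)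
    simp only [isAnagramSub, hc, if_true, List.foldl_cons]
    exact ih _ (fun c' hc' => by
      rw [PySem.Dict.contains_insert]
      simp [h c' (List.mem_cons_of_mem _ hc')])

theorem subLoop_none (l : List Char) (d : PySem.Dict Char Int)
    (h : ¬ ∀ c ∈ l, d.contains c = true) :
    isAnagramSub d l = none := by
  induction l generalizing d with
  | nil => exact absurd (by simp) h
  | cons c cs ih =>
    by_cases hc : d.contains c = true
    · simp only [isAnagramSub, hc, if_true]
      apply ih
      intro hall
      apply h
      intro c' hc'
      rcases List.mem_cons.mp hc' with rfl | hmem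
      · exact hc
      · have := hall c' hmem
        rw [PySem.Dict.contains_insert] at this
        rcases Bool.or_eq_true_iff.mp this with heq | hd
        · have : c' = c := by simpa using heq
          subst this; exact hc
        · exact hd
    · simp [isAnagramSub, hc]

-- A returns true iff: equal lengths, every char of t occurs in s, and counts agree on chars of s.
theorem is_anagram_true_iff (s t : String) :
    is_anagram s t = true ↔
      (s.toList.length = t.toList.length ∧ (∀ c ∈ t.toList, c ∈ s.toList) ∧
       ∀ c ∈ s.toList, s.toList.count c = t.toList.count c) := by
  unfold is_anagram
  rw [build_eq_counter]
  by_cases hlen : PySem.Str.len s = PySem.Str.len t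
  · simp only [hlen, ne_eq, not_true_eq_false, if_false]
    have hlen' : s.toList.length = t.toList.length := by
      have := hlen; simp only [PySem.Str.len] at this; exact_mod_cast this
    by_cases hmem : ∀ c ∈ t.toList, (PySem.Dict.counter s.toList).contains c = true
    · rw [subLoop_some _ _ hmem]
      have hmem' : ∀ c ∈ t.toList, c ∈ s.toList := by
        intro c hc
        have := hmem c hc
        rw [PySem.Dict.contains_iff_mem_keys, PySem.Dict.keys_counter] at this
        exact (PySem.Set.mem_ofList _ _).mp this
      set d' := t.toList.foldl (fun d c => d.insert c (d.getD c 0 - 1))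
        (PySem.Dict.counter s.toList) with hd'
      have hkeys : d'.keys = PySem.Set.ofList s.toList := by
        rw [hd', PySem.Dict.keys_foldl_insert, PySem.Dict.keys_counter,
          PySem.Set.update_eq_append_filter]
        have hfil : (PySem.Set.ofList t.toList).filter
            (fun y => !(PySem.Set.contains (PySem.Set.ofList s.toList) y)) = [] := by
          apply List.filter_eq_nil_iff.mpr
          intro c hc
          have hcs : c ∈ s.toList := hmem' c ((PySem.Set.mem_ofList _ _).mp hc)
          simpa using hcs
        rw [hfil, List.append_nil]
      have hnd : d'.keys.Nodup := by
        rw [hkeys]; exact PySem.Set.nodup_ofList _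
      show (d'.values.all fun v => v == 0) = true ↔
        (s.toList.length = t.toList.length ∧ (∀ c ∈ t.toList, c ∈ s.toList) ∧
         ∀ c ∈ s.toList, s.toList.count c = t.toList.count c)
      rw [PySem.Dict.values_eq_map_keys d' hnd 0]
      constructor
      · intro hall
        refine ⟨hlen', hmem', fun c hc => ?_⟩
        have hkc : c ∈ d'.keys := by
          rw [hkeys]; exact (PySem.Set.mem_ofList _ _).mpr hc
        have hz0 := List.all_eq_true.mp hall _ (List.mem_map_of_mem hkc)
        have hz : d'.getD c 0 = 0 := by simpa using hz0
        rw [hd', getD_foldl_insert_sub_one, PySem.Dict.getD_counter] at hz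
        omega
      · rintro ⟨_, _, hcount⟩
        apply List.all_eq_true.mpr
        intro v hv
        rcases List.mem_map.mp hv with ⟨c, hc, rfl⟩
        have hcs : c ∈ s.toList := by
          rw [hkeys] at hc; exact (PySem.Set.mem_ofList _ _).mp hc
        have := hcount c hcs
        simp only [hd', getD_foldl_insert_sub_one, PySem.Dict.getD_counter]
        simp only [beq_iff_eq]
        omega
    · rw [subLoop_none _ _ hmem]
      simp only [Bool.false_eq_true, false_iff]
      rintro ⟨_, hm, _⟩
      apply hmem
      intro c hc
      rw [PySem.Dict.contains_iff_mem_keys, PySem.Dict.keys_counter]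
      exact (PySem.Set.mem_ofList _ _).mpr (hm c hc)
  · simp only [hlen, ne_eq, not_false_eq_true, if_true, Bool.false_eq_true, false_iff]
    rintro ⟨h1, _, _⟩
    apply hlen
    simp only [PySem.Str.len]
    exact_mod_cast h1

theorem core_iff_perm (s t : String) :
    (s.toList.length = t.toList.length ∧ (∀ c ∈ t.toList, c ∈ s.toList) ∧
       ∀ c ∈ s.toList, s.toList.count c = t.toList.count c) ↔ s.toList.Perm t.toList := by
  constructor
  · rintro ⟨hlen, hmem, hcount⟩
    rw [List.perm_iff_count]
    intro c
    by_cases hc : c ∈ s.toList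
    · exact hcount c hc
    · have hs : s.toList.count c = 0 := List.count_eq_zero.mpr hc
      have ht : t.toList.count c = 0 := List.count_eq_zero.mpr (fun h => hc (hmem c h))
      rw [hs, ht]
  · intro hp
    exact ⟨hp.length_eq, fun c hc => (hp.mem_iff).mpr hc,
      fun c _ => List.perm_iff_count.mp hp c⟩

-- ===== VERDICT (by name: the statement is the Claim_ definition above) =====
theorem is_anagram_spec : Claim_equal_is_anagram := by
  intro s t _
  unfold Spec_is_anagram
  rw [alt_eq_perm]
  by_cases hp : s.toList.Perm t.toList
  · rw [decide_eq_true hp, is_anagram_true_iff, core_iff_perm]; exact hp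
  · rw [decide_eq_false hp]
    rw [← Bool.not_eq_true, is_anagram_true_iff, core_iff_perm]
    exact hp
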